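-- pv_equiv track=rewrite | github.com/google/clusterfuzz | src/python/datastore/search_tokenizer.py | _token_indices
-- ===== SOURCE A (Python) =====
-- def _is_camel_case_ab(s, index):
--   """Determine if the index is at 'aB', which is the start of a camel token.
--     For example, with 'workAt', this function detects 'kA'."""
--   return index >= 1 and s[index - 1].islower() and s[index].isupper()
--
-- def _is_camel_case_abb(s, index):
--   """Determine if the index ends at 'ABb', which is the start of a camel
--     token. For example, with 'HTMLParser', this function detects 'LPa'."""
--   return (index >= 2 and s[index - 2].isupper() and s[index - 1].isupper() and
--           s[index].islower())
--
-- def _token_indices(s):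
--   """Iterate through (end_current_token_index, start_next_token_index) of
--     `s`, which is tokenized based on non-alphanumeric characters and camel
--     casing. For example, 'aa:bbCC' have 3 tokens: 'aa', 'bb', 'CC'.
--     This function iterates through (1,3), (4,5), and (6,7); they represent
--     a[a]:[b]bCC, aa:b[b][C]C, and aa:bbC[C][], respectively."""
--   index = 0
--   length = len(s)
--   while index < length:
--     if not s[index].isalnum():
--       end_index = index - 1
--       while index < length and not s[index].isalnum():
--         index += 1
--       yield end_index, index
--     elif _is_camel_case_ab(s, index):
--       yield (index - 1), index
--       index += 1
--     elif _is_camel_case_abb(s, index):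
--       yield (index - 2), (index - 1)
--       index += 1
--     else:
--       index += 1
--
--   yield (length - 1), length
-- ===== SOURCE B (Python) =====
-- def _token_indices(s):
--   """One pass over the positions, no inner skip loop: a non-alphanumeric run's
--   (end_prev_token, next_start) pair is emitted when the run ENDS, using the
--   carried start of the current run; camel-case splits are emitted per index."""
--   n = len(s)
--   start = 0
--   for i in range(n):
--     c = s[i]
--     if not c.isalnum():
--       if i == 0 or s[i - 1].isalnum():
--         start = i
--       if i + 1 == n or s[i + 1].isalnum():
--         yield start - 1, i + 1
--     elif i >= 1 and s[i - 1].islower() and c.isupper():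
--       yield i - 1, i
--     elif i >= 2 and s[i - 2].isupper() and s[i - 1].isupper() and c.islower():
--       yield i - 2, i - 1
--   yield n - 1, n
-- ===== Notes on version B (the rewrite author's own statement) =====
-- stated objective: alternative
-- what changed: A skips each non-alphanumeric run with an inner while-loop and yields its pair at the run start; B is a single for-loop over indices with no inner loop, carrying the current run's start and yielding the pair when the run ends.
import Mathlib
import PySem

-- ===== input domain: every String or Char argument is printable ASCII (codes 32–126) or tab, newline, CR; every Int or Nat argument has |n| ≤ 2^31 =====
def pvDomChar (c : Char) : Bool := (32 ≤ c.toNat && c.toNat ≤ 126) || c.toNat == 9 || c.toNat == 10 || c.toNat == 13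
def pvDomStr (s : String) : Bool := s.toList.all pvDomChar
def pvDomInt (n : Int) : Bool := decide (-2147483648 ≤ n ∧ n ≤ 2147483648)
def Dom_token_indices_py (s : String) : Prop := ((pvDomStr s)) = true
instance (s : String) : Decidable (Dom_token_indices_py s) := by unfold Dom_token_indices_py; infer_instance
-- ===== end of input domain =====

-- B replaces A's inner skip-ahead while-loop by a single pass that carries the start of the
-- current non-alphanumeric run and emits its pair when the run ends (objective: alternative).

-- s[i] for an index the loops already checked to be in range
def pvAt (l : List Char) (i : Nat) : Char := l.getD i ' '

-- ===== PORT A =====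
-- _is_camel_case_ab(s, index)
def pvIsAb (l : List Char) (i : Nat) : Bool :=
  decide (1 ≤ i) && PySem.Chars.islower (pvAt l (i - 1)) && PySem.Chars.isupper (pvAt l i)

-- _is_camel_case_abb(s, index)
def pvIsAbb (l : List Char) (i : Nat) : Bool :=
  decide (2 ≤ i) && PySem.Chars.isupper (pvAt l (i - 2)) &&
    PySem.Chars.isupper (pvAt l (i - 1)) && PySem.Chars.islower (pvAt l i)

-- the inner 'while index < length and not s[index].isalnum(): index += 1'
def pvAInner (l : List Char) (i : Nat) : Nat :=
  if i < l.length then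
    if PySem.Chars.isalnum (pvAt l i) then i else pvAInner l (i + 1)
  else i
termination_by l.length - i

-- termination helper for the outer loop (cited by decreasing_by below)
theorem pvAInner_ge (l : List Char) (i : Nat) : i ≤ pvAInner l i := by
  fun_induction pvAInner l i with
  | case1 => omega
  | case2 _ _ _ ih => omega
  | case3 => omega

theorem pvAInner_step (l : List Char) (i : Nat) (hi : i < l.length)
    (hna : ¬ PySem.Chars.isalnum (pvAt l i) = true) : pvAInner l i = pvAInner l (i + 1) := by
  rw [pvAInner]; simp [hi, hna]

-- the outer while-loop of _token_indices, plus the final yield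
def pvALoop (l : List Char) (i : Nat) : List (Int × Int) :=
  if hi : i < l.length then
    if hna : ¬ PySem.Chars.isalnum (pvAt l i) = true then
      ((i : Int) - 1, (pvAInner l i : Int)) :: pvALoop l (pvAInner l i)
    else if pvIsAb l i then ((i : Int) - 1, (i : Int)) :: pvALoop l (i + 1)
    else if pvIsAbb l i then ((i : Int) - 2, (i : Int) - 1) :: pvALoop l (i + 1)
    else pvALoop l (i + 1)
  else [((l.length : Int) - 1, (l.length : Int))]
termination_by l.length - i
decreasing_by
  · have h1 : pvAInner l i = pvAInner l (i + 1) := pvAInner_step l i hi hna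
    have h2 := pvAInner_ge l (i + 1)
    omega
  all_goals omega

def token_indices_py (s : String) : List (Int × Int) := pvALoop s.toList 0

-- ===== PORT B =====
-- the 'for i in range(n)' loop of Source B carrying the run-start accumulator, plus the final yield
def pvBLoop (l : List Char) (i : Nat) (start : Int) : List (Int × Int) :=
  if i < l.length then
    let c := pvAt l i
    if ¬ PySem.Chars.isalnum c = true then
      let start' : Int :=
        if decide (i = 0) || PySem.Chars.isalnum (pvAt l (i - 1)) then (i : Int) else start
      let rest := pvBLoop l (i + 1) start'
      if decide (i + 1 = l.length) || PySem.Chars.isalnum (pvAt l (i + 1)) then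
        (start' - 1, (i : Int) + 1) :: rest
      else rest
    else if decide (1 ≤ i) && PySem.Chars.islower (pvAt l (i - 1)) && PySem.Chars.isupper c then
      ((i : Int) - 1, (i : Int)) :: pvBLoop l (i + 1) start
    else if decide (2 ≤ i) && PySem.Chars.isupper (pvAt l (i - 2)) &&
        PySem.Chars.isupper (pvAt l (i - 1)) && PySem.Chars.islower c then
      ((i : Int) - 2, (i : Int) - 1) :: pvBLoop l (i + 1) start
    else pvBLoop l (i + 1) start
  else [((l.length : Int) - 1, (l.length : Int))]
termination_by l.length - i

def token_indices_py_alt (s : String) : List (Int × Int) := pvBLoop s.toList 0 0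

-- ===== PRECONDITION & SPEC =====
def Spec_token_indices_py (s : String) (out : List (Int × Int)) : Prop := out = token_indices_py_alt s
instance (s : String) (out : List (Int × Int)) : Decidable (Spec_token_indices_py s out) := by unfold Spec_token_indices_py; infer_instance

-- ===== CLAIM (what is proved, stated in full; the proofs are below) =====
def Claim_equal_token_indices_py : Prop := ∀ (s : String), Dom_token_indices_py s → Spec_token_indices_py s (token_indices_py s)

-- ===== LEMMAS AND PROOFS =====

theorem pvAInner_le (l : List Char) (i : Nat) (h : i ≤ l.length) : pvAInner l i ≤ l.length := by
  fun_induction pvAInner l i with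
  | case1 => omega
  | case2 _ _ _ ih => exact ih (by omega)
  | case3 => omega

theorem pvAInner_mid (l : List Char) (i m : Nat) (h1 : i ≤ m) (h2 : m < pvAInner l i) :
    ¬ PySem.Chars.isalnum (pvAt l m) = true := by
  fun_induction pvAInner l i with
  | case1 => omega
  | case2 _ hlt hna ih =>
      rcases Nat.eq_or_lt_of_le h1 with rfl | h1'
      · exact hna
      · exact ih h1' h2
  | case3 => omega

theorem pvAInner_end (l : List Char) (i : Nat) (h : pvAInner l i < l.length) :
    PySem.Chars.isalnum (pvAt l (pvAInner l i)) = true := by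
  fun_induction pvAInner l i with
  | case1 _ _ ha => exact ha
  | case2 _ _ _ ih => exact ih h
  | case3 => omega

-- interior of a non-alphanumeric run: B emits nothing until the run's last index,
-- where it yields (start-1, j) with the carried start
theorem pvRunB (l : List Char) (j : Nat) (hjn : j ≤ l.length)
    (hjend : j = l.length ∨ PySem.Chars.isalnum (pvAt l j) = true) :
    ∀ fuel i st, j - i ≤ fuel → 1 ≤ i → i < j →
    (∀ m, i - 1 ≤ m → m < j → ¬ PySem.Chars.isalnum (pvAt l m) = true) →
    pvBLoop l i st = (st - 1, (j : Int)) :: pvBLoop l j st := by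
  intro fuel
  induction fuel with
  | zero => intro i st hf h1 hij _; omega
  | succ k ih =>
      intro i st hf h1 hij hmid
      have hin : i < l.length := by omega
      have hna : ¬ PySem.Chars.isalnum (pvAt l i) = true := hmid i (by omega) hij
      have hprev : ¬ PySem.Chars.isalnum (pvAt l (i - 1)) = true := hmid (i - 1) (by omega) (by omega)
      have hi0 : ¬ i = 0 := by omega
      rw [pvBLoop]
      simp only [hin, if_true, hna, not_false_iff, if_true, hi0, decide_false,
        Bool.false_or, hprev, Bool.false_eq_true, if_false]
      by_cases hend : i + 1 = j
      · have hcond : (decide (i + 1 = l.length) || PySem.Chars.isalnum (pvAt l (i + 1))) = true := by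
          rcases hjend with h | h
          · simp [← hend] at h ⊢; omega
          · rw [hend]; simp [h]
        rw [hcond, if_pos rfl, hend]
        have hc : ((i : Int) + 1) = (j : Int) := by omega
        rw [hc]
      · have hnext : ¬ PySem.Chars.isalnum (pvAt l (i + 1)) = true := hmid (i + 1) (by omega) (by omega)
        have hcond : (decide (i + 1 = l.length) || PySem.Chars.isalnum (pvAt l (i + 1))) = false := by
          have : ¬ i + 1 = l.length := by omega
          simp [this, hnext]
        rw [hcond]
        simp only [Bool.false_eq_true, if_false]
        exact ih (i + 1) st (by omega) (by omega) (by omega)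
          (fun m hm1 hm2 => hmid m (by omega) hm2)

-- main invariant: from any index A actually visits, the two loops agree (for every start value)
theorem pvMain (l : List Char) :
    ∀ fuel i, l.length - i ≤ fuel → i ≤ l.length →
    (i < l.length → ¬ PySem.Chars.isalnum (pvAt l i) = true →
      (i = 0 ∨ PySem.Chars.isalnum (pvAt l (i - 1)) = true)) →
    ∀ st, pvALoop l i = pvBLoop l i st := by
  intro fuel
  induction fuel with
  | zero =>
      intro i hf hle _ st
      have hi : ¬ i < l.length := by omega
      rw [pvALoop, pvBLoop, dif_neg hi, if_neg hi]
  | succ k ih =>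
      intro i hf hle hvis st
      by_cases hi : i < l.length
      · by_cases hna : PySem.Chars.isalnum (pvAt l i) = true
        · -- alphanumeric index: identical camel branches, step to i+1
          have hnn : ¬ ¬ PySem.Chars.isalnum (pvAt l i) = true := not_not_intro hna
          have hnext : ∀ st', pvALoop l (i + 1) = pvBLoop l (i + 1) st' :=
            fun st' => ih (i + 1) (by omega) (by omega)
              (fun _ _ => Or.inr (by simpa using hna)) st'
          rw [pvALoop, pvBLoop, dif_pos hi, dif_neg hnn, if_pos hi]
          simp only [hnn, if_false]
          unfold pvIsAb pvIsAbb
          split_ifs <;> rw [hnext]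
        · -- start of a non-alphanumeric run
          obtain ⟨j, hj⟩ : ∃ j, pvAInner l i = j := ⟨_, rfl⟩
          have hji : i < j := by
            have h1 := pvAInner_step l i hi hna
            have h2 := pvAInner_ge l (i + 1)
            omega
          have hjn : j ≤ l.length := hj ▸ pvAInner_le l i (by omega)
          have hjend : j = l.length ∨ PySem.Chars.isalnum (pvAt l j) = true := by
            by_cases h : j < l.length
            · exact Or.inr (hj ▸ pvAInner_end l i (hj ▸ h))
            · exact Or.inl (by omega)
          have hmid : ∀ m, i ≤ m → m < j → ¬ PySem.Chars.isalnum (pvAt l m) = true :=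
            fun m h1 h2 => pvAInner_mid l i m h1 (hj ▸ h2)
          have hrest : ∀ st', pvALoop l j = pvBLoop l j st' := by
            intro st'
            refine ih j (by omega) hjn ?_ st'
            intro hjl hjna
            rcases hjend with h | h
            · omega
            · exact absurd h hjna
          have hreset : (decide (i = 0) || PySem.Chars.isalnum (pvAt l (i - 1))) = true := by
            rcases hvis hi hna with h | h
            · simp [h]
            · simp [h]
          rw [pvALoop, pvBLoop, dif_pos hi, dif_pos hna, if_pos hi, hj]
          simp only [hna, if_true, hreset, if_true]
          by_cases hend : i + 1 = j
          · have hcond : (decide (i + 1 = l.length) || PySem.Chars.isalnum (pvAt l (i + 1))) = true := by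
              rcases hjend with h | h
              · simp [← hend] at h ⊢; omega
              · rw [hend]; simp [h]
            rw [hcond, if_pos rfl, hend, hrest ((i : Int))]
            have hc : ((j : Int)) = (i : Int) + 1 := by omega
            rw [hc]
            simp
          · have hnext : ¬ PySem.Chars.isalnum (pvAt l (i + 1)) = true :=
              hmid (i + 1) (by omega) (by omega)
            have hcond : (decide (i + 1 = l.length) || PySem.Chars.isalnum (pvAt l (i + 1))) = false := by
              have h2 : ¬ i + 1 = l.length := by omega
              simp [h2, hnext]
            rw [hcond]
            simp only [Bool.false_eq_true, if_false]
            rw [pvRunB l j hjn hjend k (i + 1) ((i : Int)) (by omega) (by omega) (by omega)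
              (fun m hm1 hm2 => hmid m (by omega) hm2), hrest ((i : Int))]
            simp
      · rw [pvALoop, pvBLoop, dif_neg hi, if_neg hi]

-- ===== VERDICT (by name: the statement is the Claim_ definition above) =====
theorem token_indices_py_spec : Claim_equal_token_indices_py := by
  intro s _
  unfold Spec_token_indices_py token_indices_py token_indices_py_alt
  exact pvMain s.toList (s.toList.length + 1) 0 (by omega) (by omega)
    (fun _ _ => Or.inl rfl) 0
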